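-- pv_equiv track=rewrite | github.com/cgosiak/daily-coding | daily/day_634.py | get_max_area
-- ===== SOURCE A (Python) =====
-- def get_max_area(histogram) -> int:
--     max_area = 0
--     for i in range(len(histogram)):
--         chunk_size = histogram[i]
--         local_area = 0
--         for k in range(i, len(histogram)):
--             if histogram[k] >= chunk_size:
--                 local_area += chunk_size
--         if local_area > max_area:
--             max_area = local_area
--     return max_area
-- ===== SOURCE B (Python) =====
-- def get_max_area(histogram) -> int:
--     best = 0
--     s = []  # sorted (ascending) values of the suffix seen so far
--     for v in reversed(histogram):
--         # binary search: insertion point of v in s (leftmost)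
--         lo, hi = 0, len(s)
--         while lo < hi:
--             mid = (lo + hi) // 2
--             if s[mid] < v:
--                 lo = mid + 1
--             else:
--                 hi = mid
--         s.insert(lo, v)
--         area = v * (len(s) - lo)
--         if area > best:
--             best = area
--     return best
-- ===== Notes on version B (the rewrite author's own statement) =====
-- stated objective: faster
-- what changed: Instead of an O(n^2) nested rescan of the suffix for every index, B scans the histogram right-to-left maintaining the suffix values in a sorted list, locating each new value's insertion point by hand-rolled binary search so the count of suffix elements >= v is read off as len(s) - lo.
import Mathlib
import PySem

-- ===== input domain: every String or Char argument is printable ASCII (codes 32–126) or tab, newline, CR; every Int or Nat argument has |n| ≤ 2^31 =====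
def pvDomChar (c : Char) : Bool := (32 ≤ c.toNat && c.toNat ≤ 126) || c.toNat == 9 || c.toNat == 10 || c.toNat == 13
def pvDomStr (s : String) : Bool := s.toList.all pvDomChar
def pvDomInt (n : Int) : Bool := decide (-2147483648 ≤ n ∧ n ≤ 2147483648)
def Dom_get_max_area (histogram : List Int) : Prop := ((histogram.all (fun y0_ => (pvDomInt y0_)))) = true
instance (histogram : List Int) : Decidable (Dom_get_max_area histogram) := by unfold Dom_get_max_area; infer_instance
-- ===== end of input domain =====

-- B replaces A's per-index rescan of the suffix by a right-to-left sweep that keeps the suffix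
-- values in a sorted list and reads the count of elements ≥ v off a binary search (faster).

-- ===== PORT A =====
def get_max_area (histogram : List Int) : Int :=
  (PySem.List.pyRange 0 (histogram.length : Int) 1).foldl (fun max_area i =>
    let chunk_size := PySem.List.pyGetD histogram i 0
    let local_area := (PySem.List.pyRange i (histogram.length : Int) 1).foldl
      (fun local_area k =>
        if PySem.List.pyGetD histogram k 0 ≥ chunk_size then local_area + chunk_size
        else local_area) 0
    if local_area > max_area then local_area else max_area) 0

-- ===== PORT B =====
-- the hand-written lo/hi halving loop of Source B is exactly PySem.List.bisectLeft's loop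
def get_max_area_alt (histogram : List Int) : Int :=
  (histogram.reverse.foldl (fun (st : Int × List Int) v =>
    let lo := PySem.List.bisectLeft st.2 v
    let s' := PySem.List.insert st.2 (lo : Int) v
    let area := v * ((s'.length : Int) - (lo : Int))
    (if area > st.1 then area else st.1, s')) ((0 : Int), ([] : List Int))).1

-- ===== PRECONDITION & SPEC =====
def Spec_get_max_area (histogram : List Int) (out : Int) : Prop := out = get_max_area_alt histogram
instance (histogram : List Int) (out : Int) : Decidable (Spec_get_max_area histogram out) := by unfold Spec_get_max_area; infer_instance

-- ===== CLAIM (what is proved, stated in full; the proofs are below) =====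
def Claim_equal_get_max_area : Prop := ∀ (histogram : List Int), Dom_get_max_area histogram → Spec_get_max_area histogram (get_max_area histogram)

-- ===== LEMMAS AND PROOFS =====

-- candidate areas of every suffix, left to right; `acc` is extra context to the right
def candsC : List Int → List Int → List Int
  | [], _ => []
  | v :: t, acc => (v * (((v :: t ++ acc).countP (fun x => decide (v ≤ x)) : Nat) : Int)) :: candsC t acc

-- candidate areas as B discovers them (right to left); `acc` holds the elements already seen
def candsRev : List Int → List Int → List Int
  | [], _ => []
  | v :: l, acc => (v * (((v :: acc).countP (fun x => decide (v ≤ x)) : Nat) : Int)) :: candsRev l (v :: acc)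

-- a running strict-improvement update IS a running max
lemma foldl_gt_map_max (F : Nat → Int) (l : List Nat) (a : Int) :
    l.foldl (fun m i => if F i > m then F i else m) a = (l.map F).foldl max a := by
  induction l generalizing a with
  | nil => rfl
  | cons x l ih => simp only [List.foldl_cons, List.map_cons, ih]; congr 1; omega

lemma foldl_max_shift (l : List Int) (a x : Int) :
    l.foldl max (max a x) = max (l.foldl max a) x := by
  induction l generalizing a with
  | nil => rfl
  | cons y l ih =>
      simp only [List.foldl_cons]
      rw [show max (max a x) y = max (max a y) x by omega, ih]

lemma foldl_max_reverse (l : List Int) (a : Int) :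
    l.reverse.foldl max a = l.foldl max a := by
  induction l generalizing a with
  | nil => rfl
  | cons x l ih =>
      simp only [List.reverse_cons, List.foldl_append, List.foldl_cons, List.foldl_nil, ih]
      rw [← foldl_max_shift]

-- 'if p(x): acc += c' over a list is c times the count
lemma foldl_if_add_const (p : Int → Prop) [DecidablePred p] (c : Int) (l : List Int) (a : Int) :
    l.foldl (fun acc x => if p x then acc + c else acc) a
      = a + c * ((l.countP (fun x => decide (p x)) : Nat) : Int) := by
  induction l generalizing a with
  | nil => simp
  | cons x l ih =>
      simp only [List.foldl_cons, List.countP_cons, ih]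
      by_cases hx : p x
      · simp only [hx, if_true, decide_true]
        push_cast
        ring
      · simp [hx]

-- the indices i..n-1 read through the histogram are exactly the suffix
lemma map_pyRange_drop (h : List Int) (d i : Nat) (hd : h.length - i ≤ d) :
    (PySem.List.pyRange (i : Int) (h.length : Int) 1).map (fun k => PySem.List.pyGetD h k 0)
      = h.drop i := by
  induction d generalizing i with
  | zero =>
      have hi : h.length ≤ i := by omega
      rw [PySem.List.pyRange_one_eq_nil (by exact_mod_cast hi), List.map_nil,
        List.drop_eq_nil_of_le hi]
  | succ d ih =>
      by_cases hi : i < h.length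
      · rw [PySem.List.pyRange_one_cons (by exact_mod_cast hi), List.map_cons,
          show (i : Int) + 1 = ((i + 1 : Nat) : Int) by push_cast; ring,
          ih (i + 1) (by omega), List.drop_eq_getElem_cons hi]
        congr 1
        rw [PySem.List.pyGetD_natCast, List.getD_eq_getElem h 0 hi]
      · rw [PySem.List.pyRange_one_eq_nil (by exact_mod_cast (by omega : h.length ≤ i)),
          List.map_nil, List.drop_eq_nil_of_le (by omega)]

-- A's inner loop at index i computes the suffix-candidate value
lemma inner_loop_eq (h : List Int) (i : Nat) (hi : i < h.length) :
    (PySem.List.pyRange (i : Int) (h.length : Int) 1).foldl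
      (fun local_area k =>
        if PySem.List.pyGetD h k 0 ≥ PySem.List.pyGetD h (i : Int) 0
        then local_area + PySem.List.pyGetD h (i : Int) 0 else local_area) 0
    = (h.getD i 0) * (((h.drop i).countP (fun x => decide (h.getD i 0 ≤ x)) : Nat) : Int) := by
  have hget : PySem.List.pyGetD h (i : Int) 0 = h.getD i 0 := PySem.List.pyGetD_natCast h i 0
  have hmap := map_pyRange_drop h h.length i (by omega)
  have key : ((PySem.List.pyRange (i : Int) (h.length : Int) 1).map
        (fun k => PySem.List.pyGetD h k 0)).foldl
        (fun a x => if h.getD i 0 ≤ x then a + h.getD i 0 else a) 0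
      = (h.getD i 0) * (((h.drop i).countP (fun x => decide (h.getD i 0 ≤ x)) : Nat) : Int) := by
    rw [hmap, foldl_if_add_const (fun x => h.getD i 0 ≤ x) (h.getD i 0), zero_add]
  rw [List.foldl_map] at key
  simp only [ge_iff_le, hget]
  exact key

-- the per-index candidates, left to right, are candsC
lemma map_range_cands (h : List Int) :
    (List.range h.length).map
      (fun i => (h.getD i 0) * (((h.drop i).countP (fun x => decide (h.getD i 0 ≤ x)) : Nat) : Int))
      = candsC h [] := by
  induction h with
  | nil => rfl
  | cons v t ih =>
      simp only [List.length_cons, List.range_succ_eq_map, List.map_cons, List.map_map, candsC]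
      refine congrArg₂ _ ?_ ?_
      · simp
      · rw [← ih]
        apply List.map_congr_left
        intro i _
        simp [Function.comp]

lemma A_eq_cands (h : List Int) : get_max_area h = (candsC h []).foldl max 0 := by
  simp only [get_max_area]
  rw [PySem.List.pyRange_zero_natCast, List.foldl_map, foldl_gt_map_max]
  congr 1
  rw [← map_range_cands h]
  apply List.map_congr_left
  intro i hi
  exact inner_loop_eq h i (List.mem_range.mp hi)

-- B's loop invariant: s is the sorted suffix seen so far, acc the same multiset
lemma B_loop (l : List Int) : ∀ (best : Int) (s acc : List Int),
    s.Pairwise (· ≤ ·) → s.Perm acc →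
    (l.foldl (fun (st : Int × List Int) v =>
      (if v * (((PySem.List.insert st.2 ((PySem.List.bisectLeft st.2 v : Nat) : Int) v).length : Int)
            - ((PySem.List.bisectLeft st.2 v : Nat) : Int)) > st.1
       then v * (((PySem.List.insert st.2 ((PySem.List.bisectLeft st.2 v : Nat) : Int) v).length : Int)
            - ((PySem.List.bisectLeft st.2 v : Nat) : Int))
       else st.1,
       PySem.List.insert st.2 ((PySem.List.bisectLeft st.2 v : Nat) : Int) v)) (best, s)).1
    = (candsRev l acc).foldl max best := by
  induction l with
  | nil => intro best s acc _ _; rfl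
  | cons v l ih =>
      intro best s acc hs hperm
      obtain ⟨hle, hlt, hge⟩ := PySem.List.bisectLeft_spec s v hs
      have hins : PySem.List.insert s ((PySem.List.bisectLeft s v : Nat) : Int) v
          = s.take (PySem.List.bisectLeft s v) ++ v :: s.drop (PySem.List.bisectLeft s v) :=
        PySem.List.insert_natCast s _ v hle
      set lo := PySem.List.bisectLeft s v with hlodef
      -- the inserted list is sorted
      have hsorted : (s.take lo ++ v :: s.drop lo).Pairwise (· ≤ ·) := by
        rw [List.pairwise_append]
        refine ⟨hs.sublist (List.take_sublist _ _), ?_, ?_⟩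
        · rw [List.pairwise_cons]
          refine ⟨?_, hs.sublist (List.drop_sublist _ _)⟩
          intro y hy
          obtain ⟨j, hj, rfl⟩ := List.mem_iff_getElem.mp hy
          rw [List.getElem_drop]
          exact hge (lo + j) (by simp [List.length_drop] at hj; omega) (by omega)
        · intro x hx y hy
          obtain ⟨j, hj, rfl⟩ := List.mem_iff_getElem.mp hx
          have hjlo : j < lo := by simp [List.length_take] at hj; omega
          have hjlen : j < s.length := by omega
          have hxv : (s.take lo)[j] < v := by
            rw [List.getElem_take]; exact hlt j hjlen hjlo
          rcases List.mem_cons.mp hy with rfl | hy2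
          · exact le_of_lt hxv
          · obtain ⟨k, hk, rfl⟩ := List.mem_iff_getElem.mp hy2
            have hklen : lo + k < s.length := by simp [List.length_drop] at hk; omega
            have hvy : v ≤ (s.drop lo)[k] := by
              rw [List.getElem_drop]; exact hge (lo + k) hklen (by omega)
            exact le_trans (le_of_lt hxv) hvy
      -- the inserted list is a permutation of v :: acc
      have hperm' : (s.take lo ++ v :: s.drop lo).Perm (v :: acc) := by
        refine List.perm_middle.trans ?_
        rw [List.take_append_drop]
        exact hperm.cons v
      -- counting: elements ≥ v in s sit from position lo on
      have hcount : s.countP (fun x => decide (v ≤ x)) = s.length - lo := by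
        conv_lhs => rw [← List.take_append_drop lo s]
        rw [List.countP_append]
        have h1 : (s.take lo).countP (fun x => decide (v ≤ x)) = 0 := by
          rw [List.countP_eq_zero]
          intro a ha
          obtain ⟨j, hj, rfl⟩ := List.mem_iff_getElem.mp ha
          have hjlo : j < lo := by simp [List.length_take] at hj; omega
          have hjlen : j < s.length := by omega
          have := hlt j hjlen hjlo
          rw [List.getElem_take] at *
          simp only [decide_eq_true_eq]
          omega
        have h2 : (s.drop lo).countP (fun x => decide (v ≤ x)) = (s.drop lo).length := by
          rw [List.countP_eq_length]
          intro a ha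
          obtain ⟨k, hk, rfl⟩ := List.mem_iff_getElem.mp ha
          have hklen : lo + k < s.length := by simp [List.length_drop] at hk; omega
          have := hge (lo + k) hklen (by omega)
          rw [List.getElem_drop] at *
          simpa using this
        rw [h1, h2, List.length_drop]
        omega
      -- B's area is the candidate value
      have harea : v * (((PySem.List.insert s ((lo : Nat) : Int) v).length : Int) - ((lo : Nat) : Int))
          = v * (((v :: acc).countP (fun x => decide (v ≤ x)) : Nat) : Int) := by
        rw [hins]
        have hlen : (s.take lo ++ v :: s.drop lo).length = s.length + 1 := by simp
        have haccc : (v :: acc).countP (fun x => decide (v ≤ x)) = s.length - lo + 1 := by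
          rw [List.countP_cons, ← hperm.countP_eq, hcount]
          simp
        rw [hlen, haccc]
        congr 1
        push_cast
        omega
      simp only [List.foldl_cons]
      rw [← hlodef]
      rw [ih (if v * (((PySem.List.insert s ((lo : Nat) : Int) v).length : Int) - ((lo : Nat) : Int)) > best
              then v * (((PySem.List.insert s ((lo : Nat) : Int) v).length : Int) - ((lo : Nat) : Int))
              else best)
            (PySem.List.insert s ((lo : Nat) : Int) v) (v :: acc)
            (hins ▸ hsorted) (hins ▸ hperm')]
      simp only [candsRev, List.foldl_cons]
      congr 1
      rw [harea, max_def]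
      split_ifs <;> omega

lemma candsC_append (t : List Int) (v : Int) (acc : List Int) :
    candsC (t ++ [v]) acc
      = candsC t (v :: acc) ++ [v * (((v :: acc).countP (fun x => decide (v ≤ x)) : Nat) : Int)] := by
  induction t with
  | nil => simp [candsC]
  | cons u t ih =>
      simp only [List.cons_append, candsC, ih, List.append_assoc, List.nil_append]

lemma candsRev_reverse (h : List Int) : ∀ acc, candsRev h.reverse acc = (candsC h acc).reverse := by
  induction h using List.reverseRecOn with
  | nil => intro acc; rfl
  | append_singleton t v ih =>
      intro acc
      rw [List.reverse_append, List.reverse_singleton, List.singleton_append, candsRev,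
        ih (v :: acc), candsC_append, List.reverse_append, List.reverse_singleton,
        List.singleton_append]

lemma B_eq_cands (h : List Int) :
    get_max_area_alt h = (candsC h []).foldl max 0 := by
  have hB := B_loop h.reverse 0 [] [] List.Pairwise.nil (List.Perm.refl [])
  rw [show get_max_area_alt h
      = (h.reverse.foldl (fun (st : Int × List Int) v =>
          (if v * (((PySem.List.insert st.2 ((PySem.List.bisectLeft st.2 v : Nat) : Int) v).length : Int)
                - ((PySem.List.bisectLeft st.2 v : Nat) : Int)) > st.1
           then v * (((PySem.List.insert st.2 ((PySem.List.bisectLeft st.2 v : Nat) : Int) v).length : Int)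
                - ((PySem.List.bisectLeft st.2 v : Nat) : Int))
           else st.1,
           PySem.List.insert st.2 ((PySem.List.bisectLeft st.2 v : Nat) : Int) v)) ((0 : Int), ([] : List Int))).1
      from rfl,
    hB, candsRev_reverse h [], foldl_max_reverse]

-- ===== VERDICT (by name: the statement is the Claim_ definition above) =====
theorem get_max_area_spec : Claim_equal_get_max_area := by
  intro histogram _
  unfold Spec_get_max_area
  rw [A_eq_cands, B_eq_cands]
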